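-- pv_equiv track=rewrite | github.com/Lotar-lucas/Restaurant-Orders | src/helpers_functions.py | days_without_visits
-- ===== SOURCE A (Python) =====
-- def days_without_visits(data, name_client):
--     all_days = set()
--     list_days_never_asked = set()
--
--     for element in data:
--         all_days.add(element["day"])
--         if element["name"] == name_client:
--             list_days_never_asked.add(element["day"])
--
--     return all_days - list_days_never_asked
-- ===== SOURCE B (Python) =====
-- def days_without_visits(data, name_client):
--     by_day = {}
--     for element in data:
--         by_day.setdefault(element["day"], set()).add(element["name"])
--     return {day for day, names in by_day.items() if name_client not in names}
-- ===== Notes on version B (the rewrite author's own statement) =====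
-- stated objective: idiomatic
-- what changed: B replaces A's two flat day-sets and set difference by a per-day visitor index (dict day -> set of names built with setdefault) and a second pass that filters the dict items by membership of the client.
import Mathlib
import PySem

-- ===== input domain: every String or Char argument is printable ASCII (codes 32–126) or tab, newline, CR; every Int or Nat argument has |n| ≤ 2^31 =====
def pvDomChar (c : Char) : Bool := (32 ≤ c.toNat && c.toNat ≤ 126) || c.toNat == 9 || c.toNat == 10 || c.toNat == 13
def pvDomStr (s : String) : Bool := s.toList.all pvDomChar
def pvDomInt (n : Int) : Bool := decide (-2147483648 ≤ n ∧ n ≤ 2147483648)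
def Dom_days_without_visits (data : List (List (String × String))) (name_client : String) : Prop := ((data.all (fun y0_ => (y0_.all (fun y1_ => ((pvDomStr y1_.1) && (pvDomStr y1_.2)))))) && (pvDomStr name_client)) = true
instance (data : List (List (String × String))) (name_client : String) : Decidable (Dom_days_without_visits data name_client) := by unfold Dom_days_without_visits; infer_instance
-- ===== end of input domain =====

-- B replaces A's two flat day-sets and set difference by a per-day visitor index
-- (dict day -> set of names) filtered by membership; objective: idiomatic, same cost.

-- ===== PORT A =====
-- element["day"] / element["name"] raise KeyError when the key is missing; ported as
-- Dict.getD with default "", exact under Pre_days_without_visits (keys present).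
def days_without_visits (data : List (List (String × String))) (name_client : String) : List String :=
  let st := data.foldl (fun (st : PySem.Set String × PySem.Set String) element =>
      let e := PySem.Dict.mk element
      let all_days := PySem.Set.add st.1 (e.getD "day" "")
      let never := if e.getD "name" "" == name_client then PySem.Set.add st.2 (e.getD "day" "") else st.2
      (all_days, never))
    (PySem.Set.empty, PySem.Set.empty)
  PySem.Set.diff st.1 st.2

-- ===== PORT B =====
def days_without_visits_alt (data : List (List (String × String))) (name_client : String) : List String :=
  let by_day := data.foldl (fun (d : PySem.Dict String (PySem.Set String)) element =>
      let e := PySem.Dict.mk element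
      d.modify (e.getD "day" "") PySem.Set.empty (fun s => PySem.Set.add s (e.getD "name" "")))
    PySem.Dict.empty
  PySem.Set.ofList ((by_day.items.filter (fun p => !(PySem.Set.contains p.2 name_client))).map (fun p => p.1))

-- ===== PRECONDITION & SPEC =====
-- Pre_ excludes exactly the inputs where A raises KeyError: an element missing key "day" or "name".
def Pre_days_without_visits (data : List (List (String × String))) (name_client : String) : Prop :=
  (data.all (fun element => (PySem.Dict.mk element).contains "day" && (PySem.Dict.mk element).contains "name")) = true
instance (data : List (List (String × String))) (name_client : String) : Decidable (Pre_days_without_visits data name_client) := by unfold Pre_days_without_visits; infer_instance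
def pvWitness_days_without_visits : (List (List (String × String))) × String :=
  ([[("day", "mon"), ("name", "ana")], [("day", "tue"), ("name", "bob")]], "ana")

def Spec_days_without_visits (data : List (List (String × String))) (name_client : String) (out : List String) : Prop := out = days_without_visits_alt data name_client
instance (data : List (List (String × String))) (name_client : String) (out : List String) : Decidable (Spec_days_without_visits data name_client out) := by unfold Spec_days_without_visits; infer_instance

-- ===== CLAIM (what is proved, stated in full; the proofs are below) =====
def Claim_equal_days_without_visits : Prop := ∀ (data : List (List (String × String))) (name_client : String), Dom_days_without_visits data name_client → Pre_days_without_visits data name_client → Spec_days_without_visits data name_client (days_without_visits data name_client)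

-- ===== LEMMAS AND PROOFS =====

def pvDay (element : List (String × String)) : String := (PySem.Dict.mk element).getD "day" ""
def pvName (element : List (String × String)) : String := (PySem.Dict.mk element).getD "name" ""

def pvAF (name_client : String) : (PySem.Set String × PySem.Set String) → List (String × String) → (PySem.Set String × PySem.Set String) :=
  fun st element =>
    let e := PySem.Dict.mk element
    (PySem.Set.add st.1 (e.getD "day" ""),
     if e.getD "name" "" == name_client then PySem.Set.add st.2 (e.getD "day" "") else st.2)

def pvBF (name_client : String) : PySem.Dict String (PySem.Set String) → List (String × String) → PySem.Dict String (PySem.Set String) :=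
  fun d element =>
    let e := PySem.Dict.mk element
    d.modify (e.getD "day" "") PySem.Set.empty (fun s => PySem.Set.add s (e.getD "name" ""))

theorem pvAF_fst (c : String) (l : List (List (String × String))) :
    ∀ a b, (l.foldl (pvAF c) (a, b)).1 = l.foldl (fun s e => PySem.Set.add s (pvDay e)) a := by
  induction l with
  | nil => intro a b; rfl
  | cons e l ih => intro a b; exact ih _ _

theorem pvAF_snd (c : String) (l : List (List (String × String))) :
    ∀ a b, (l.foldl (pvAF c) (a, b)).2 =
      l.foldl (fun s e => if pvName e == c then PySem.Set.add s (pvDay e) else s) b := by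
  induction l with
  | nil => intro a b; rfl
  | cons e l ih => intro a b; exact ih _ _

-- membership invariant for the "never asked" set vs the per-day index
theorem pvAsked_mem (c : String) (l : List (List (String × String))) :
    ∀ (b : PySem.Set String) (d : PySem.Dict String (PySem.Set String)),
      (∀ x, x ∈ b ↔ c ∈ d.getD x PySem.Set.empty) →
      ∀ x, x ∈ l.foldl (fun s e => if pvName e == c then PySem.Set.add s (pvDay e) else s) b ↔
           c ∈ (l.foldl (pvBF c) d).getD x PySem.Set.empty := by
  induction l with
  | nil => intro b d h x; exact h x
  | cons e l ih =>
    intro b d h x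
    simp only [List.foldl_cons]
    apply ih
    intro y
    show (y ∈ if pvName e == c then PySem.Set.add b (pvDay e) else b) ↔
         c ∈ (pvBF c d e).getD y PySem.Set.empty
    have hd : (pvBF c d e).getD y PySem.Set.empty =
        if y = pvDay e then PySem.Set.add (d.getD (pvDay e) PySem.Set.empty) (pvName e)
        else d.getD y PySem.Set.empty := by
      simp [pvBF, pvDay, pvName, PySem.Dict.getD_modify]
    rw [hd]
    by_cases hy : y = pvDay e
    · subst hy
      rw [if_pos rfl]
      by_cases hn : pvName e = c
      · simp [hn, PySem.Set.mem_add]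
      · rw [if_neg (by simpa using hn), PySem.Set.mem_add]
        constructor
        · intro hb; exact Or.inl ((h (pvDay e)).1 hb)
        · rintro (hc | hc)
          · exact (h (pvDay e)).2 hc
          · exact absurd hc.symm hn
    · rw [if_neg hy]
      by_cases hn : pvName e == c
      · rw [if_pos hn, PySem.Set.mem_add]
        constructor
        · rintro (hb | hb)
          · exact (h y).1 hb
          · exact absurd hb hy
        · intro hc; exact Or.inl ((h y).2 hc)
      · rw [if_neg (by simpa using hn)]; exact h y
  -- end

theorem pvItems_filter_map (q : PySem.Set String → Bool) (l : List (String × PySem.Set String))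
    (h : (l.map Prod.fst).Nodup) :
    (l.filter (fun p => q p.2)).map Prod.fst =
      (l.map Prod.fst).filter (fun k => q ((PySem.Dict.mk l).getD k PySem.Set.empty)) := by
  induction l with
  | nil => rfl
  | cons p l ih =>
    obtain ⟨k, v⟩ := p
    simp only [List.map_cons, List.nodup_cons] at h
    have hget : ∀ y ∈ l.map Prod.fst,
        (PySem.Dict.mk ((k, v) :: l)).getD y PySem.Set.empty =
          (PySem.Dict.mk l).getD y PySem.Set.empty := by
      intro y hy
      have hky : (k == y) = false := by
        simp only [beq_eq_false_iff_ne]; intro hkk; exact h.1 (hkk ▸ hy)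
      simp [PySem.Dict.getD_eq_get?_getD, PySem.Dict.get?_mk_cons, hky]
    have hself : (PySem.Dict.mk ((k, v) :: l)).getD k PySem.Set.empty = v := by
      simp [PySem.Dict.getD_eq_get?_getD, PySem.Dict.get?_mk_cons]
    simp only [List.filter_cons, List.map_cons, hself]
    by_cases hq : q v
    · simp only [hq, if_pos, List.map_cons, ih h.2]
      congr 1
      exact (List.filter_congr (fun y hy => by rw [hget y hy])).symm
    · simp only [hq, Bool.false_eq_true, if_neg, not_false_iff, ih h.2]
      exact (List.filter_congr (fun y hy => by rw [hget y hy])).symm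

theorem days_without_visits_spec : Claim_equal_days_without_visits := by
  unfold Claim_equal_days_without_visits
  intro data c _hdom _hpre
  unfold Spec_days_without_visits days_without_visits days_without_visits_alt
  show PySem.Set.diff (data.foldl (pvAF c) (PySem.Set.empty, PySem.Set.empty)).1
        (data.foldl (pvAF c) (PySem.Set.empty, PySem.Set.empty)).2
      = PySem.Set.ofList ((((data.foldl (pvBF c) PySem.Dict.empty).items.filter
          (fun p => !(PySem.Set.contains p.2 c))).map (fun p => p.1)))
  set d := data.foldl (pvBF c) PySem.Dict.empty with hd
  -- keys of the index = the all_days set, in order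
  have hBkeys : d.keys = PySem.Set.update (PySem.Dict.empty : PySem.Dict String (PySem.Set String)).keys (data.map pvDay) :=
    PySem.Dict.keys_foldl_modify_key data pvDay PySem.Set.empty
      (fun _ e s => PySem.Set.add s (pvName e)) PySem.Dict.empty
  have hkeys : d.keys = (data.foldl (pvAF c) (PySem.Set.empty, PySem.Set.empty)).1 := by
    rw [pvAF_fst, hBkeys, ← PySem.Set.update_map_eq_foldl_add]
    rfl
  have hnodup : d.keys.Nodup :=
    PySem.Dict.nodup_keys_foldl_modify_key data pvDay PySem.Set.empty
      (fun _ e s => PySem.Set.add s (pvName e)) PySem.Dict.empty (by simp)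
  -- membership in the never-asked set = client present in the index entry
  have hasked : ∀ x, x ∈ (data.foldl (pvAF c) (PySem.Set.empty, PySem.Set.empty)).2 ↔
      c ∈ d.getD x PySem.Set.empty := by
    intro x
    rw [pvAF_snd]
    exact pvAsked_mem c data PySem.Set.empty PySem.Dict.empty
      (fun y => by simp [PySem.Dict.getD_empty, PySem.Set.empty]) x
  -- rewrite B's comprehension as a filter of the keys
  have hB : ((d.items.filter (fun p => !(PySem.Set.contains p.2 c))).map (fun p => p.1)) =
      d.keys.filter (fun k => !(PySem.Set.contains (d.getD k PySem.Set.empty) c)) := by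
    have := pvItems_filter_map (fun s => !(PySem.Set.contains s c)) d.items hnodup
    simpa using this
  rw [hB, PySem.Set.ofList_eq_self_of_nodup _ (hnodup.filter _)]
  show (data.foldl (pvAF c) (PySem.Set.empty, PySem.Set.empty)).1.filter
      (fun x => !(PySem.Set.contains (data.foldl (pvAF c) (PySem.Set.empty, PySem.Set.empty)).2 x))
    = d.keys.filter (fun k => !(PySem.Set.contains (d.getD k PySem.Set.empty) c))
  rw [← hkeys]
  apply List.filter_congr
  intro x _
  have h1 := hasked x
  by_cases hx : x ∈ (data.foldl (pvAF c) (PySem.Set.empty, PySem.Set.empty)).2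
  · have h2 : c ∈ d.getD x PySem.Set.empty := h1.1 hx
    simp [PySem.Set.contains_iff, hx, h2]
    exact h1
  · have h2 : c ∉ d.getD x PySem.Set.empty := fun hc => hx (h1.2 hc)
    simp [PySem.Set.contains_iff, hx, h2]
    exact h1

-- ===== VERDICT (by name: the statement is the Claim_ definition above) =====
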